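-- pv_equiv track=rewrite | github.com/arjun34t/costal-adviser | tools/price_scraper.py | _state_average
-- ===== SOURCE A (Python) =====
-- def _avg(*values: int) -> int:
--     valid = [v for v in values if v > 0]
--     return round(sum(valid) / len(valid)) if valid else 0
--
-- def _state_average(scraped: dict) -> dict[str, int]:
--     """Compute Kerala state average from state-level sources."""
--     poi       = scraped.get("prices_org_in_kerala", {})
--     gc_kerala = scraped.get("golden_chennai_kerala", {})
--     dc        = scraped.get("daatacenter_kerala", {})
--
--     # Merge all state-level varieties
--     all_vars = set(poi.keys()) | set(gc_kerala.keys()) | set(dc.keys())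
--     result: dict[str, int] = {}
--     for v in all_vars:
--         prices = [src.get(v, 0) for src in (poi, gc_kerala, dc)]
--         avg = _avg(*prices)
--         if avg > 0:
--             result[v] = avg
--     return result
-- ===== SOURCE B (Python) =====
-- def _round_div(s: int, c: int) -> int:
--     """Round s/c to the nearest integer, ties to even (exact for our magnitudes)."""
--     q, r = divmod(s, c)
--     return q + (1 if (2 * r > c or (2 * r == c and q % 2 == 1)) else 0)
--
-- def _state_average(scraped: dict) -> dict[str, int]:
--     """Compute Kerala state average from state-level sources."""
--     total: dict[str, int] = {}
--     count: dict[str, int] = {}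
--     for key in ("prices_org_in_kerala", "golden_chennai_kerala", "daatacenter_kerala"):
--         for v, p in scraped.get(key, {}).items():
--             if v not in total:
--                 total[v] = 0
--                 count[v] = 0
--             if p > 0:
--                 total[v] += p
--                 count[v] += 1
--     return {v: _round_div(total[v], count[v]) for v in total if count[v] > 0}
-- ===== Notes on version B (the rewrite author's own statement) =====
-- stated objective: alternative
-- what changed: Replaces the union-of-keys pass (three dict lookups and a filtered-average per variety) by a single accumulation pass that maintains per-variety running total and count dicts over the items of the three sources, then one rounding pass; float round(sum/len) is replaced by exact integer round-half-to-even division. Pre_ excludes association lists whose inner source lists carry duplicate keys, which do not represent Python dicts (first-match lookup vs accumulation over all pairs is accidental there).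
import Mathlib
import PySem

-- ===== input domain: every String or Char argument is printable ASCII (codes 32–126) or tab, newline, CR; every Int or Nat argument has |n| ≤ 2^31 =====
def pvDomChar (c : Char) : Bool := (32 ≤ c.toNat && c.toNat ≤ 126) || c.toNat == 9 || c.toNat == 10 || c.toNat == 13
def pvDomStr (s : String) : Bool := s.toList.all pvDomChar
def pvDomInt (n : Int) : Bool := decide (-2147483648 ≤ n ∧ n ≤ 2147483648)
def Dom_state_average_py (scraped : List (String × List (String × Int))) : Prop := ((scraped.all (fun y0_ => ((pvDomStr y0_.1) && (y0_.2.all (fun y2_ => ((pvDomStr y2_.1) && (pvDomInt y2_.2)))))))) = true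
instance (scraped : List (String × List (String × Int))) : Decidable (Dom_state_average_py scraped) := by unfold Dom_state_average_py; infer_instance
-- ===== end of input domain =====

-- B replaces the per-variety three-source lookup/average of A by one accumulation
-- pass over the items of the three sources into running total/count dicts plus a
-- rounding pass (objective: alternative decomposition, same cost).

-- ===== PORT A =====

-- round(s / c): Python rounds the float s/c half-to-even; for the magnitudes this
-- file's domain admits (|s| ≤ 3·2^31, 1 ≤ c ≤ 3) this integer formulation is exact.
def pvRoundDiv (s c : Int) : Int :=
  let q := PySem.Int.floordiv s c
  let r := s - q * c
  if 2 * r < c then q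
  else if c < 2 * r then q + 1
  else if PySem.Int.mod q 2 = 0 then q else q + 1

-- _avg(*prices)
def pvAvg (prices : List Int) : Int :=
  let valid := prices.filter (fun v => decide (0 < v))
  if valid.isEmpty then 0 else pvRoundDiv valid.sum (valid.length : Int)

-- Python iterates all_vars in (unmodelled) set hash order and the practical result is a
-- dict; here the set is consumed in first-insertion order — the returned dict is
-- compared as a dict (order ignored), so this choice is observationally faithful.
def state_average_py (scraped : List (String × List (String × Int))) : List (String × Int) :=
  let poi : PySem.Dict String Int := ⟨((PySem.Dict.get? ⟨scraped⟩ "prices_org_in_kerala").getD [])⟩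
  let gcK : PySem.Dict String Int := ⟨((PySem.Dict.get? ⟨scraped⟩ "golden_chennai_kerala").getD [])⟩
  let dc  : PySem.Dict String Int := ⟨((PySem.Dict.get? ⟨scraped⟩ "daatacenter_kerala").getD [])⟩
  let allVars : PySem.Set String :=
    PySem.Set.union (PySem.Set.union (PySem.Set.ofList poi.keys) (PySem.Set.ofList gcK.keys)) (PySem.Set.ofList dc.keys)
  (allVars.foldl (fun (result : PySem.Dict String Int) v =>
      let prices := [poi.getD v 0, gcK.getD v 0, dc.getD v 0]
      let avg := pvAvg prices
      if 0 < avg then result.insert v avg else result) PySem.Dict.empty).items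

-- ===== PORT B =====

-- one item (v, p) of a source updates the running (total, count) tables
def pvAccStep (tc : PySem.Dict String Int × PySem.Dict String Int) (vp : String × Int) :
    PySem.Dict String Int × PySem.Dict String Int :=
  let tc' := if tc.1.contains vp.1 then tc else (tc.1.insert vp.1 0, tc.2.insert vp.1 0)
  if 0 < vp.2 then (tc'.1.modify vp.1 0 (· + vp.2), tc'.2.modify vp.1 0 (· + 1)) else tc'

def state_average_py_alt (scraped : List (String × List (String × Int))) : List (String × Int) :=
  let tc :=
    ["prices_org_in_kerala", "golden_chennai_kerala", "daatacenter_kerala"].foldl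
      (fun tc key => ((PySem.Dict.get? ⟨scraped⟩ key).getD []).foldl pvAccStep tc)
      (PySem.Dict.empty, PySem.Dict.empty)
  -- {v: _round_div(total[v], count[v]) for v in total if count[v] > 0}
  (tc.1.keys.foldl (fun (r : PySem.Dict String Int) v =>
      if 0 < tc.2.getD v 0 then r.insert v (pvRoundDiv (tc.1.getD v 0) (tc.2.getD v 0)) else r)
    PySem.Dict.empty).items

-- ===== PRECONDITION & SPEC =====
-- Pre_ excludes association lists whose inner source lists carry duplicate keys:
-- they do not represent Python dicts, so behaviour there is accidental.
def Pre_state_average_py (scraped : List (String × List (String × Int))) : Prop :=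
  ∀ src ∈ scraped, (src.2.map Prod.fst).Nodup
instance (scraped : List (String × List (String × Int))) : Decidable (Pre_state_average_py scraped) := by
  unfold Pre_state_average_py; infer_instance

def pvWitness_state_average_py : (List (String × List (String × Int))) :=
  [("prices_org_in_kerala", [("rubber", 18000), ("pepper", 0)]),
   ("golden_chennai_kerala", [("rubber", 18500)])]

def Spec_state_average_py (scraped : List (String × List (String × Int))) (out : List (String × Int)) : Prop := out = state_average_py_alt scraped
instance (scraped : List (String × List (String × Int))) (out : List (String × Int)) : Decidable (Spec_state_average_py scraped out) := by unfold Spec_state_average_py; infer_instance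

-- ===== CLAIM (what is proved, stated in full; the proofs are below) =====
def Claim_equal_state_average_py : Prop := ∀ (scraped : List (String × List (String × Int))), Dom_state_average_py scraped → Pre_state_average_py scraped → Spec_state_average_py scraped (state_average_py scraped)

-- ===== LEMMAS AND PROOFS =====

-- L1: conditional-insert fold over fresh distinct keys produces a filter/map items list
theorem pv_cond_insert_items (a g : String → Int) :
    ∀ (l : List String) (d : PySem.Dict String Int), l.Nodup → (∀ v ∈ l, d.contains v = false) →
    (l.foldl (fun r v => if 0 < a v then r.insert v (g v) else r) d).items
      = d.items ++ (l.filter (fun v => decide (0 < a v))).map (fun v => (v, g v)) := by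
  intro l
  induction l with
  | nil => simp
  | cons x xs ih =>
    intro d hnd hf
    simp only [List.foldl_cons, List.filter_cons]
    by_cases hx : 0 < a x
    · have hcx : d.contains x = false := hf x (by simp)
      have : ∀ v ∈ xs, (d.insert x (g x)).contains v = false := by
        intro v hv
        rw [PySem.Dict.contains_insert]
        have : v ≠ x := by rintro rfl; exact (List.nodup_cons.mp hnd).1 hv
        simp [this, hf v (by simp [hv])]
      rw [if_pos hx, ih _ (List.nodup_cons.mp hnd).2 this,
        PySem.Dict.items_insert_of_not_contains (h := hcx)]
      simp [hx]
    · rw [if_neg hx, ih _ (List.nodup_cons.mp hnd).2 (fun v hv => hf v (by simp [hv]))]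
      simp [hx]

-- L2: effect of one accumulation step on keys, lookups and freshness
theorem pv_step_facts (t c : PySem.Dict String Int) (p : String × Int)
    (hnd : t.keys.Nodup) (hcc : ∀ v, c.contains v = t.contains v) :
    (pvAccStep (t, c) p).1.keys = PySem.Set.add t.keys p.1
    ∧ (pvAccStep (t, c) p).1.keys.Nodup
    ∧ (∀ v, (pvAccStep (t, c) p).2.contains v = (pvAccStep (t, c) p).1.contains v)
    ∧ (∀ v, (pvAccStep (t, c) p).1.getD v 0
          = t.getD v 0 + (if p.1 == v && decide (0 < p.2) then p.2 else 0))
    ∧ (∀ v, (pvAccStep (t, c) p).2.getD v 0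
          = c.getD v 0 + (if p.1 == v && decide (0 < p.2) then 1 else 0)) := by
  have hbeq : ∀ v : String, v ≠ p.1 → (p.1 == v) = false := by
    intro v hv; simp only [beq_eq_false_iff_ne]; exact fun h => hv h.symm
  by_cases hc : t.contains p.1 = true
  · have hadd : PySem.Set.add t.keys p.1 = t.keys :=
      PySem.Set.add_of_mem ((PySem.Dict.contains_iff_mem_keys t p.1).mp hc)
    by_cases hp : 0 < p.2
    · simp only [pvAccStep, hc, if_true, if_pos hp]
      refine ⟨?_, ?_, ?_, ?_, ?_⟩
      · rw [PySem.Dict.keys_modify, PySem.Dict.keys_insert_of_contains t _ hc, hadd]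
      · rw [PySem.Dict.keys_modify, PySem.Dict.keys_insert_of_contains t _ hc]; exact hnd
      · intro v; simp [PySem.Dict.contains_modify, hcc v]
      · intro v
        rw [PySem.Dict.getD_modify]
        by_cases hv : v = p.1
        · subst hv; simp [hp]
        · simp [hv, hbeq v hv]
      · intro v
        rw [PySem.Dict.getD_modify]
        by_cases hv : v = p.1
        · subst hv; simp [hp]
        · simp [hv, hbeq v hv]
    · simp only [pvAccStep, hc, if_true, if_neg hp]
      refine ⟨by simp [hadd], hnd, hcc, ?_, ?_⟩
      · intro v; simp [hp]
      · intro v; simp [hp]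
  · have hc' : t.contains p.1 = false := by simpa using hc
    have hcc' : c.contains p.1 = false := by rw [hcc]; exact hc'
    have hnm : p.1 ∉ t.keys := fun h => by simp [(PySem.Dict.contains_iff_mem_keys t p.1).mpr h] at hc'
    have hadd : PySem.Set.add t.keys p.1 = t.keys ++ [p.1] := PySem.Set.add_of_not_mem hnm
    have hkt : (t.insert p.1 0).keys = t.keys ++ [p.1] :=
      PySem.Dict.keys_insert_of_not_contains (v := 0) (h := hc')
    have hkc : (c.insert p.1 0).keys = c.keys ++ [p.1] :=
      PySem.Dict.keys_insert_of_not_contains (v := 0) (h := hcc')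
    have hndk : (t.keys ++ [p.1]).Nodup := by
      rw [List.nodup_append]
      refine ⟨hnd, List.nodup_singleton _, ?_⟩
      intro a ha b hb
      simp only [List.mem_singleton] at hb
      subst hb; exact fun h => hnm (h ▸ ha)
    have hgt : ∀ v, (t.insert p.1 0).getD v 0 = t.getD v 0 := by
      intro v
      rw [PySem.Dict.getD_insert]
      by_cases hv : v = p.1
      · subst hv; simp [PySem.Dict.getD_of_not_contains (h := hc')]
      · simp [hv]
    have hgc : ∀ v, (c.insert p.1 0).getD v 0 = c.getD v 0 := by
      intro v
      rw [PySem.Dict.getD_insert]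
      by_cases hv : v = p.1
      · subst hv; simp [PySem.Dict.getD_of_not_contains (h := hcc')]
      · simp [hv]
    have hct : ∀ v, (c.insert p.1 0).contains v = (t.insert p.1 0).contains v := by
      intro v; simp [PySem.Dict.contains_insert, hcc v]
    have hcin : (t.insert p.1 0).contains p.1 = true := PySem.Dict.contains_insert_self t p.1 0
    by_cases hp : 0 < p.2
    · simp only [pvAccStep, hc', if_false, Bool.false_eq_true, if_pos hp]
      refine ⟨?_, ?_, ?_, ?_, ?_⟩
      · rw [PySem.Dict.keys_modify, PySem.Dict.insert_insert_self,
          PySem.Dict.keys_insert_of_not_contains (h := hc'), hadd]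
      · rw [PySem.Dict.keys_modify, PySem.Dict.insert_insert_self,
          PySem.Dict.keys_insert_of_not_contains (h := hc')]; exact hndk
      · intro v; simp [PySem.Dict.contains_modify, hct v]
      · intro v
        rw [PySem.Dict.getD_modify]
        by_cases hv : v = p.1
        · subst hv; simp [hp, hgt]
        · simp [hv, hbeq v hv, hgt]
      · intro v
        rw [PySem.Dict.getD_modify]
        by_cases hv : v = p.1
        · subst hv; simp [hp, hgc]
        · simp [hv, hbeq v hv, hgc]
    · simp only [pvAccStep, hc', if_false, Bool.false_eq_true, if_neg hp]
      refine ⟨by simp [hkt, hadd], by simp [hkt, hndk], hct, ?_, ?_⟩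
      · intro v; simp [hp, hgt]
      · intro v; simp [hp, hgc]

-- L3: invariant of the accumulation fold
theorem pv_acc_inv (L : List (String × Int)) :
    ∀ (t c : PySem.Dict String Int), t.keys.Nodup → (∀ v, c.contains v = t.contains v) →
    (L.foldl pvAccStep (t, c)).1.keys = PySem.Set.update t.keys (L.map Prod.fst)
    ∧ (L.foldl pvAccStep (t, c)).1.keys.Nodup
    ∧ (∀ v, (L.foldl pvAccStep (t, c)).1.getD v 0
          = t.getD v 0 + ((L.filter (fun p => p.1 == v && decide (0 < p.2))).map Prod.snd).sum)
    ∧ (∀ v, (L.foldl pvAccStep (t, c)).2.getD v 0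
          = c.getD v 0 + ((L.filter (fun p => p.1 == v && decide (0 < p.2))).length : Int)) := by
  induction L with
  | nil => intro t c hnd hcc; simp [PySem.Set.update_nil, hnd]
  | cons p ps ih =>
    intro t c hnd hcc
    obtain ⟨hk, hn, hcts, hgt, hgc⟩ := pv_step_facts t c p hnd hcc
    obtain ⟨ihk, ihn, ihgt, ihgc⟩ :=
      ih (pvAccStep (t, c) p).1 (pvAccStep (t, c) p).2 hn hcts
    have hfold : ps.foldl pvAccStep ((pvAccStep (t, c) p).1, (pvAccStep (t, c) p).2)
        = ps.foldl pvAccStep (pvAccStep (t, c) p) := by rfl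
    rw [hfold] at ihk ihn ihgt ihgc
    refine ⟨?_, by simpa using ihn, ?_, ?_⟩
    · simp only [List.foldl_cons, List.map_cons, PySem.Set.update_cons, ihk, hk]
    · intro v
      simp only [List.foldl_cons, ihgt v, hgt v, List.filter_cons]
      by_cases hcond : (p.1 == v && decide (0 < p.2)) = true
      · simp [hcond]; ring
      · simp [hcond]
    · intro v
      simp only [List.foldl_cons, ihgc v, hgc v, List.filter_cons]
      by_cases hcond : (p.1 == v && decide (0 < p.2)) = true
      · simp [hcond]; ring
      · simp [hcond]

-- L4: lookup in a literal association-list dict, one step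
theorem pv_getD_mk_cons (q : String × Int) (qs : List (String × Int)) (v : String) :
    PySem.Dict.getD ⟨q :: qs⟩ v 0 = if q.1 == v then q.2 else PySem.Dict.getD ⟨qs⟩ v 0 := by
  cases q with
  | mk k x =>
    rw [PySem.Dict.getD_eq_get?_getD, PySem.Dict.get?_mk_cons]
    by_cases h : (k == v) = true <;> simp [h, PySem.Dict.getD_eq_get?_getD]

theorem pv_not_mem_filter (src : List (String × Int)) (v : String)
    (h : v ∉ src.map Prod.fst) :
    src.filter (fun p => p.1 == v && decide (0 < p.2)) = [] := by
  rw [List.filter_eq_nil_iff]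
  intro p hp
  have : p.1 ≠ v := fun he => h (he ▸ List.mem_map_of_mem hp)
  simp [this]

-- L5: with unique keys, a source's positive entries at v are the filtered lookup
theorem pv_source_filter (src : List (String × Int)) (h : (src.map Prod.fst).Nodup) (v : String) :
    (src.filter (fun p => p.1 == v && decide (0 < p.2))).map Prod.snd
      = [PySem.Dict.getD (⟨src⟩ : PySem.Dict String Int) v 0].filter (fun x => decide (0 < x)) := by
  induction src with
  | nil =>
    have h0 : PySem.Dict.getD (⟨[]⟩ : PySem.Dict String Int) v 0 = 0 := rfl
    simp [h0]
  | cons q qs ih =>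
    rw [List.filter_cons, pv_getD_mk_cons]
    by_cases hqv : (q.1 == v) = true
    · have hv : v = q.1 := (beq_iff_eq.mp hqv).symm
      have hqs : v ∉ qs.map Prod.fst := by
        subst hv; exact (List.nodup_cons.mp (by simpa using h)).1
      rw [pv_not_mem_filter qs v hqs, hqv]
      by_cases hp : (0 : Int) < q.2
      · simp [hp]
      · simp [hp]
    · have hqv' : (q.1 == v) = false := by simpa using hqv
      rw [hqv']
      simp only [Bool.false_and, Bool.false_eq_true, if_false]
      exact ih (List.nodup_cons.mp (by simpa using h)).2

-- L6: any source looked up from the scraped dict satisfies Pre_'s key uniqueness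
theorem pv_src_nodup (scraped : List (String × List (String × Int)))
    (hpre : ∀ src ∈ scraped, (src.2.map Prod.fst).Nodup) (k : String) :
    ((((PySem.Dict.get? (⟨scraped⟩ : PySem.Dict String (List (String × Int))) k).getD [])).map Prod.fst).Nodup := by
  induction scraped with
  | nil =>
    simp [show PySem.Dict.get? (⟨[]⟩ : PySem.Dict String (List (String × Int))) k = none from rfl]
  | cons s ss ih =>
    cases s with
    | mk n src =>
      rw [PySem.Dict.get?_mk_cons]
      by_cases hn : (n == k) = true
      · rw [hn]; simp only [if_true, Option.getD_some]
        exact hpre (n, src) (by simp)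
      · rw [(by simpa using hn : (n == k) = false)]
        simp only [Bool.false_eq_true, if_false]
        exact ih (fun s hs => hpre s (by simp [hs]))

-- L7: a list of positive integers has sum at least its length
theorem pv_len_le_sum (l : List Int) (h : ∀ x ∈ l, 0 < x) : (l.length : Int) ≤ l.sum := by
  induction l with
  | nil => simp
  | cons x xs ih =>
    have hx : 0 < x := h x (by simp)
    have := ih (fun y hy => h y (by simp [hy]))
    simp only [List.length_cons, List.sum_cons]
    push_cast
    omega

-- L8: the rounded mean of c ≥ 1 positive values summing to s ≥ c is at least 1
theorem pv_roundDiv_pos (s c : Int) (hc : 0 < c) (hs : c ≤ s) : 1 ≤ pvRoundDiv s c := by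
  have h1 : 1 ≤ PySem.Int.floordiv s c := by
    rw [PySem.Int.le_floordiv_iff_mul_le hc]; omega
  simp only [pvRoundDiv]
  split_ifs <;> omega

-- L9: union of two ofList sets is ofList of the concatenation
theorem pv_union_ofList (a b : List String) :
    (PySem.Set.ofList a).union (PySem.Set.ofList b) = PySem.Set.ofList (a ++ b) := by
  show (PySem.Set.ofList a).update (PySem.Set.ofList b) = _
  rw [PySem.Set.ofList_append, PySem.Set.update_eq_append_filter,
    PySem.Set.update_eq_append_filter, PySem.Set.ofList_ofList]

-- L10: _avg is positive exactly when some price is positive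
theorem pv_avg_pos_iff (l : List Int) :
    0 < pvAvg l ↔ l.filter (fun x => decide (0 < x)) ≠ [] := by
  simp only [pvAvg]
  by_cases he : l.filter (fun x => decide (0 < x)) = []
  · simp [he]
  · have hlp : 0 < (l.filter (fun x => decide (0 < x))).length := List.length_pos_of_ne_nil he
    have h1 : 1 ≤ pvRoundDiv (l.filter (fun x => decide (0 < x))).sum
        ((l.filter (fun x => decide (0 < x))).length : Int) := by
      apply pv_roundDiv_pos
      · exact_mod_cast hlp
      · exact pv_len_le_sum _ (fun x hx => by simpa using (List.mem_filter.mp hx).2)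
    rw [if_neg (by simpa [List.isEmpty_iff] using he)]
    exact ⟨fun _ => he, fun _ => by omega⟩

-- L11: when some price is positive, _avg is the rounded mean of the positives
theorem pv_avg_eq (l : List Int) (h : l.filter (fun x => decide (0 < x)) ≠ []) :
    pvAvg l = pvRoundDiv (l.filter (fun x => decide (0 < x))).sum
      ((l.filter (fun x => decide (0 < x))).length : Int) := by
  simp only [pvAvg]
  rw [if_neg (by simpa [List.isEmpty_iff] using h)]

theorem pv_main (scraped : List (String × List (String × Int)))
    (hpre : ∀ src ∈ scraped, (src.2.map Prod.fst).Nodup) :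
    state_average_py scraped = state_average_py_alt scraped := by
  simp only [state_average_py, state_average_py_alt]
  set P : List (String × Int) :=
    (PySem.Dict.get? ({ items := scraped } : PySem.Dict String (List (String × Int))) "prices_org_in_kerala").getD [] with hP
  set G : List (String × Int) :=
    (PySem.Dict.get? ({ items := scraped } : PySem.Dict String (List (String × Int))) "golden_chennai_kerala").getD [] with hG
  set D : List (String × Int) :=
    (PySem.Dict.get? ({ items := scraped } : PySem.Dict String (List (String × Int))) "daatacenter_kerala").getD [] with hD
  have hBacc : ["prices_org_in_kerala", "golden_chennai_kerala", "daatacenter_kerala"].foldl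
      (fun tc key => List.foldl pvAccStep tc
        ((PySem.Dict.get? ({ items := scraped } : PySem.Dict String (List (String × Int))) key).getD []))
      (PySem.Dict.empty, PySem.Dict.empty)
      = (P ++ (G ++ D)).foldl pvAccStep (PySem.Dict.empty, PySem.Dict.empty) := by
    simp only [List.foldl_cons, List.foldl_nil, List.foldl_append]
    rw [← hP, ← hG, ← hD]
  rw [hBacc]
  set L : List (String × Int) := P ++ (G ++ D) with hL
  set acc := L.foldl pvAccStep
    ((PySem.Dict.empty : PySem.Dict String Int), (PySem.Dict.empty : PySem.Dict String Int)) with hacc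
  obtain ⟨hkeys, hknd, hgt, hgc⟩ := pv_acc_inv L PySem.Dict.empty PySem.Dict.empty
    (by rw [PySem.Dict.keys_empty]; exact List.nodup_nil)
    (by intro v; rfl)
  have hkeys' : acc.1.keys = PySem.Set.ofList (L.map Prod.fst) := by
    rw [hacc, hkeys, PySem.Dict.keys_empty]
    exact PySem.Set.update_empty _
  have hndP : (P.map Prod.fst).Nodup := pv_src_nodup scraped hpre _
  have hndG : (G.map Prod.fst).Nodup := pv_src_nodup scraped hpre _
  have hndD : (D.map Prod.fst).Nodup := pv_src_nodup scraped hpre _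
  have hfst : (fun x : String × Int => x.1) = Prod.fst := rfl
  have hAvars : ((PySem.Set.ofList ({ items := P } : PySem.Dict String Int).keys).union
        (PySem.Set.ofList ({ items := G } : PySem.Dict String Int).keys)).union
        (PySem.Set.ofList ({ items := D } : PySem.Dict String Int).keys)
      = PySem.Set.ofList (L.map Prod.fst) := by
    rw [PySem.Dict.keys_mk, PySem.Dict.keys_mk, PySem.Dict.keys_mk, hfst,
      pv_union_ofList, pv_union_ofList, hL]
    simp [List.append_assoc]
  rw [hAvars, hkeys']
  have hval : ∀ v : String,
      (L.filter (fun p => p.1 == v && decide (0 < p.2))).map Prod.snd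
        = ([({ items := P } : PySem.Dict String Int).getD v 0,
            ({ items := G } : PySem.Dict String Int).getD v 0,
            ({ items := D } : PySem.Dict String Int).getD v 0].filter (fun x => decide (0 < x))) := by
    intro v
    rw [hL, List.filter_append, List.filter_append, List.map_append, List.map_append,
      pv_source_filter P hndP v, pv_source_filter G hndG v, pv_source_filter D hndD v,
      show [({ items := P } : PySem.Dict String Int).getD v 0,
            ({ items := G } : PySem.Dict String Int).getD v 0,
            ({ items := D } : PySem.Dict String Int).getD v 0]
          = [({ items := P } : PySem.Dict String Int).getD v 0]
            ++ ([({ items := G } : PySem.Dict String Int).getD v 0]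
            ++ [({ items := D } : PySem.Dict String Int).getD v 0]) from rfl,
      List.filter_append, List.filter_append]
  have hsum : ∀ v : String, acc.1.getD v 0
      = ([({ items := P } : PySem.Dict String Int).getD v 0,
          ({ items := G } : PySem.Dict String Int).getD v 0,
          ({ items := D } : PySem.Dict String Int).getD v 0].filter (fun x => decide (0 < x))).sum := by
    intro v
    rw [hacc, hgt v, PySem.Dict.getD_empty, ← hval v]
    simp
  have hlen : ∀ v : String, acc.2.getD v 0
      = (([({ items := P } : PySem.Dict String Int).getD v 0,
           ({ items := G } : PySem.Dict String Int).getD v 0,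
           ({ items := D } : PySem.Dict String Int).getD v 0].filter (fun x => decide (0 < x))).length : Int) := by
    intro v
    rw [hacc, hgc v, PySem.Dict.getD_empty, ← hval v, List.length_map]
    simp
  have hcond : ∀ v : String, (0 < pvAvg
        [({ items := P } : PySem.Dict String Int).getD v 0,
         ({ items := G } : PySem.Dict String Int).getD v 0,
         ({ items := D } : PySem.Dict String Int).getD v 0]) ↔ (0 < acc.2.getD v 0) := by
    intro v
    rw [pv_avg_pos_iff, hlen v]
    constructor
    · intro h
      exact_mod_cast List.length_pos_of_ne_nil h
    · intro h
      exact List.ne_nil_of_length_pos (by exact_mod_cast h)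
  rw [pv_cond_insert_items _ _ (PySem.Set.ofList (L.map Prod.fst)) PySem.Dict.empty
      (PySem.Set.nodup_ofList _) (fun v _ => PySem.Dict.contains_empty v),
    pv_cond_insert_items _ _ (PySem.Set.ofList (L.map Prod.fst)) PySem.Dict.empty
      (PySem.Set.nodup_ofList _) (fun v _ => PySem.Dict.contains_empty v)]
  have hfeq : (PySem.Set.ofList (L.map Prod.fst)).filter (fun v => decide (0 <
      pvAvg [({ items := P } : PySem.Dict String Int).getD v 0,
             ({ items := G } : PySem.Dict String Int).getD v 0,
             ({ items := D } : PySem.Dict String Int).getD v 0]))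
      = (PySem.Set.ofList (L.map Prod.fst)).filter (fun v => decide (0 < acc.2.getD v 0)) :=
    List.filter_congr (fun v _ => by simp only [decide_eq_decide]; exact hcond v)
  rw [hfeq]
  congr 1
  apply List.map_congr_left
  intro v hv
  have hcv : 0 < acc.2.getD v 0 := by
    have := List.of_mem_filter hv
    simpa using this
  rw [hlen v] at hcv
  have hne : [({ items := P } : PySem.Dict String Int).getD v 0,
      ({ items := G } : PySem.Dict String Int).getD v 0,
      ({ items := D } : PySem.Dict String Int).getD v 0].filter (fun x => decide (0 < x)) ≠ [] :=
    List.ne_nil_of_length_pos (by exact_mod_cast hcv)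
  rw [pv_avg_eq _ hne, hsum v, hlen v]

-- ===== VERDICT (by name: the statement is the Claim_ definition above) =====
theorem state_average_py_spec : Claim_equal_state_average_py := by
  intro scraped _ hpre
  unfold Spec_state_average_py
  exact pv_main scraped hpre
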